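-- pv_equiv track=rewrite | github.com/SilasRaulAdrian/Facultate | Anul_1_Sem_1/FP/Lab/Lab_13/main.py | generate_permutations_iterativ
-- ===== SOURCE A (Python) =====
-- def generate_permutations_iterativ(n):
--     """ Genereaza toate permutarile de lungime n iterativ """
--     stack = [(0, [], [False] * (n + 1))]  # (nivelul curent, permutarea curenta, starea used)
--     result = []
--
--     while stack:
--         level, perm, used = stack.pop()
--
--         if level == n:
--             result.append(perm)
--             continue
--
--         for i in range(1, n + 1):
--             if not used[i]:
--                 if level == 0 or any(abs(i - perm[j]) == 1 for j in range(level)):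
--                     new_perm = perm + [i]
--                     new_used = used[:]
--                     new_used[i] = True
--                     stack.append((level + 1, new_perm, new_used))
--
--     return result
-- ===== SOURCE B (Python) =====
-- def generate_permutations_iterativ(n):
--     """Genereaza toate permutarile de lungime n recursiv (backtracking)."""
--     if n < 0:
--         return []
--     result = []
--
--     def backtrack(remaining, perm, used):
--         if remaining == 0:
--             result.append(perm)
--             return
--         for i in range(n, 0, -1):  # descending: matches A's LIFO exploration order
--             if i not in used and (not perm or any(abs(i - v) == 1 for v in perm)):
--                 backtrack(remaining - 1, perm + [i], used | {i})
--
--     backtrack(n, [], set())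
--     return result
-- ===== Notes on version B (the rewrite author's own statement) =====
-- stated objective: simpler
-- what changed: Replaced the explicit LIFO stack of (level, perm, bool-array) states with direct recursive backtracking over a remaining-slot counter and a set of used values, iterating candidates in descending order to reproduce A's pop order.
import Mathlib
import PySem

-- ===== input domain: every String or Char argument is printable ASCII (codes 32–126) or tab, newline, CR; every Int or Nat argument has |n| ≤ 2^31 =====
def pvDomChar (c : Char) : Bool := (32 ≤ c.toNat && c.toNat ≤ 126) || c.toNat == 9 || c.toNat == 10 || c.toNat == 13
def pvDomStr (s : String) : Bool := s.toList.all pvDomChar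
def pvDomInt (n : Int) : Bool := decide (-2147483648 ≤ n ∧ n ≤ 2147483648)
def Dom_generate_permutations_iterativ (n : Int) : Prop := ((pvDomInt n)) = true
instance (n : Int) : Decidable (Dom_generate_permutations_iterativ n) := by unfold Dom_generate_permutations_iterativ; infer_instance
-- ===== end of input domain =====

-- B replaces A's explicit LIFO stack of (level, perm, bool-array) states by recursive
-- backtracking over a remaining-slot counter and a set of used values (objective: simpler).

-- ===== PORT A =====
-- A's stack is a Lean list with its HEAD as the Python list's END (the pop/push side).

-- `not used[i]` in A: Python would raise IndexError if i were out of range; in A's run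
-- used always has length n+1 > i, so the `none` case below is unreachable (treated as skip).
def pvAdjA (i level : Int) (perm : List Int) : Bool :=
  (level == 0) || (PySem.List.pyRange 0 level 1).any (fun j =>
    match PySem.List.pyGet? perm j with
    | some v => (i - v).natAbs == 1
    | none => false)

-- the inner `for i in range(1, n+1)` loop: pushes candidate children onto the stack
def pvPush (n level : Int) (perm : List Int) (used : List Bool)
    (st : List (Int × List Int × List Bool)) : List (Int × List Int × List Bool) :=
  (PySem.List.pyRange 1 (n + 1) 1).foldl (fun st i =>
    if PySem.List.pyGet? used i = some false then
      if pvAdjA i level perm then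
        (level + 1, perm ++ [i], used.set i.toNat true) :: st
      else st
    else st) st

-- termination measure for the while loop: each stack entry weighs (n.toNat+1)^(#false in used)
def pvCF (u : List Bool) : Nat := u.count false
def pvWt (n : Int) (e : Int × List Int × List Bool) : Nat := (n.toNat + 1) ^ (pvCF e.2.2)
def pvMeas (n : Int) (st : List (Int × List Int × List Bool)) : Nat := (st.map (pvWt n)).sum

theorem pvWt_pos (n : Int) (e : Int × List Int × List Bool) : 1 ≤ pvWt n e :=
  Nat.one_le_pow _ _ (by omega)

theorem pvMeas_cons (n : Int) (e : Int × List Int × List Bool) (st : List (Int × List Int × List Bool)) :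
    pvMeas n (e :: st) = pvWt n e + pvMeas n st := by
  simp [pvMeas]

theorem pv_count_false_set (u : List Bool) (j : Nat) (hj : j < u.length) (hf : u[j] = false) :
    (u.set j true).count false + 1 = u.count false := by
  induction u generalizing j with
  | nil => simp at hj
  | cons a u ih =>
    cases j with
    | zero =>
      simp at hf; subst hf
      simp [List.count_cons]
    | succ j =>
      simp at hj
      simp at hf
      simp only [List.set, List.count_cons]
      have := ih j hj hf
      omega

theorem pvPush_nochange (n level : Int) (perm : List Int) (used : List Bool)
    (hc : pvCF used = 0) (st : List (Int × List Int × List Bool)) :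
    pvPush n level perm used st = st := by
  have hnf : ∀ i : Int, PySem.List.pyGet? used i ≠ some false := by
    intro i h
    have : false ∈ used := PySem.List.mem_of_pyGet?_eq_some used h
    have := List.count_pos_iff.mpr this
    unfold pvCF at hc; omega
  unfold pvPush
  generalize PySem.List.pyRange 1 (n + 1) 1 = L
  induction L generalizing st with
  | nil => rfl
  | cons i L ih => simp [hnf i, ih]

theorem pvPush_bound (n level : Int) (perm : List Int) (used : List Bool)
    (L : List Int) (hL : ∀ i ∈ L, 1 ≤ i) (st : List (Int × List Int × List Bool)) :
    pvMeas n (L.foldl (fun st i =>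
      if PySem.List.pyGet? used i = some false then
        if pvAdjA i level perm then
          (level + 1, perm ++ [i], used.set i.toNat true) :: st
        else st
      else st) st) ≤ pvMeas n st + L.length * (n.toNat + 1) ^ (pvCF used - 1) := by
  induction L generalizing st with
  | nil => simp
  | cons i L ih =>
    have hi : (1 : Int) ≤ i := hL i (by simp)
    have hL' : ∀ j ∈ L, (1 : Int) ≤ j := fun j hj => hL j (by simp [hj])
    simp only [List.foldl_cons]
    by_cases h1 : PySem.List.pyGet? used i = some false
    · by_cases h2 : pvAdjA i level perm = true
      · rw [if_pos h1, if_pos h2]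
        have hget : used[i.toNat]? = some false := by
          rw [← PySem.List.pyGet?_of_nonneg used (by omega : (0:Int) ≤ i)]; exact h1
        obtain ⟨hlt, hfalse⟩ := List.getElem?_eq_some_iff.mp hget
        have hcf : pvCF (used.set i.toNat true) = pvCF used - 1 := by
          have := pv_count_false_set used i.toNat hlt hfalse
          unfold pvCF; omega
        have := ih hL' ((level + 1, perm ++ [i], used.set i.toNat true) :: st)
        calc pvMeas n (L.foldl _ _) ≤ pvMeas n ((level + 1, perm ++ [i], used.set i.toNat true) :: st)
              + L.length * (n.toNat + 1) ^ (pvCF used - 1) := this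
          _ = (n.toNat + 1) ^ (pvCF used - 1) + pvMeas n st
              + L.length * (n.toNat + 1) ^ (pvCF used - 1) := by
                rw [pvMeas_cons]; unfold pvWt; rw [hcf]
          _ ≤ pvMeas n st + (i :: L).length * (n.toNat + 1) ^ (pvCF used - 1) := by
                simp [Nat.succ_mul]; try omega
      · rw [if_pos h1, if_neg h2]
        have := ih hL' st
        simp only [List.length_cons]
        calc pvMeas n (L.foldl _ _) ≤ pvMeas n st + L.length * (n.toNat + 1) ^ (pvCF used - 1) := this
          _ ≤ _ := by simp [Nat.succ_mul]; try omega; try omega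
    · rw [if_neg h1]
      have := ih hL' st
      simp only [List.length_cons]
      calc pvMeas n (L.foldl _ _) ≤ pvMeas n st + L.length * (n.toNat + 1) ^ (pvCF used - 1) := this
        _ ≤ _ := by simp [Nat.succ_mul]; try omega

theorem pvMeas_push_lt (n level : Int) (perm : List Int) (used : List Bool)
    (rest : List (Int × List Int × List Bool)) :
    pvMeas n (pvPush n level perm used rest) < pvMeas n ((level, perm, used) :: rest) := by
  rw [pvMeas_cons]
  by_cases hc : pvCF used = 0
  · rw [pvPush_nochange n level perm used hc rest]
    have := pvWt_pos n (level, perm, used)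
    omega
  · have hb := pvPush_bound n level perm used (PySem.List.pyRange 1 (n + 1) 1)
      (fun i hi => (PySem.List.mem_pyRange_one.mp hi).1) rest
    have hlen : (PySem.List.pyRange 1 (n + 1) 1).length = n.toNat := by
      rw [PySem.List.length_pyRange_one]
      omega
    rw [hlen] at hb
    have hw : pvWt n (level, perm, used) = (n.toNat + 1) ^ pvCF used := rfl
    have hsp : (n.toNat + 1) ^ pvCF used = (n.toNat + 1) ^ (pvCF used - 1) * (n.toNat + 1) := by
      conv_lhs => rw [show pvCF used = (pvCF used - 1) + 1 by omega]
      rw [pow_succ]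
    have hpos : 0 < (n.toNat + 1) ^ (pvCF used - 1) := Nat.one_le_pow _ _ (by omega)
    have : n.toNat * (n.toNat + 1) ^ (pvCF used - 1) < (n.toNat + 1) ^ pvCF used := by
      rw [hsp]; rw [Nat.mul_comm ((n.toNat + 1) ^ (pvCF used - 1)) (n.toNat + 1)]
      exact Nat.mul_lt_mul_of_lt_of_le (by omega) (le_refl _) hpos
    unfold pvPush at *
    omega

-- the main `while stack:` loop of A
def pvRunA (n : Int) (st : List (Int × List Int × List Bool)) (res : List (List Int)) :
    List (List Int) :=
  match st with
  | [] => res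
  | (level, perm, used) :: rest =>
    if level == n then pvRunA n rest (res ++ [perm])
    else pvRunA n (pvPush n level perm used rest) res
termination_by pvMeas n st
decreasing_by
  · rw [pvMeas_cons]; have := pvWt_pos n (level, perm, used); omega
  · exact pvMeas_push_lt n level perm used rest

def generate_permutations_iterativ (n : Int) : List (List Int) :=
  pvRunA n [(0, [], List.replicate (n + 1).toNat false)] []

-- ===== PORT B =====
def pvAdjB (i : Int) (perm : List Int) : Bool :=
  perm.isEmpty || perm.any (fun v => (i - v).natAbs == 1)

-- backtrack(remaining, perm, used); appended results become the returned list, in order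
def pvBT (n : Int) (k : Nat) (perm : List Int) (used : PySem.Set Int) : List (List Int) :=
  match k with
  | 0 => [perm]
  | Nat.succ k' =>
    (PySem.List.pyRange n 0 (-1)).foldl (fun acc i =>
      if !(PySem.Set.contains used i) && pvAdjB i perm then
        acc ++ pvBT n k' (perm ++ [i]) (PySem.Set.add used i)
      else acc) []

def generate_permutations_iterativ_alt (n : Int) : List (List Int) :=
  if n < 0 then [] else pvBT n n.toNat [] PySem.Set.empty

-- ===== PRECONDITION & SPEC =====
def Spec_generate_permutations_iterativ (n : Int) (out : List (List Int)) : Prop := out = generate_permutations_iterativ_alt n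
instance (n : Int) (out : List (List Int)) : Decidable (Spec_generate_permutations_iterativ n out) := by unfold Spec_generate_permutations_iterativ; infer_instance

-- ===== CLAIM (what is proved, stated in full; the proofs are below) =====
def Claim_equal_generate_permutations_iterativ : Prop := ∀ (n : Int), Dom_generate_permutations_iterativ n → Spec_generate_permutations_iterativ n (generate_permutations_iterativ n)

-- ===== LEMMAS AND PROOFS =====

-- A's adjacency test over index range(level) equals B's direct any over perm (level = len(perm))
theorem pvAdj_eq (i : Int) (p : List Int) : pvAdjA i (p.length : Int) p = pvAdjB i p := by
  unfold pvAdjA pvAdjB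
  rw [Bool.eq_iff_iff]
  simp only [Bool.or_eq_true, List.any_eq_true, beq_iff_eq, List.isEmpty_iff,
    PySem.List.mem_pyRange_one]
  constructor
  · rintro (h | ⟨j, ⟨h0, hl⟩, hm⟩)
    · left; exact List.length_eq_zero_iff.mp (by exact_mod_cast h)
    · right
      have hjl : j.toNat < p.length := by omega
      rw [PySem.List.pyGet?_eq_some_getElem p h0 (by exact_mod_cast hl)] at hm
      exact ⟨p[j.toNat], List.getElem_mem hjl, by simpa using hm⟩
  · rintro (h | ⟨v, hv, hm⟩)
    · left; simp [h]
    · right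
      obtain ⟨jn, hjn, hvj⟩ := List.mem_iff_getElem.mp hv
      refine ⟨(jn : Int), ⟨by omega, by exact_mod_cast hjn⟩, ?_⟩
      rw [PySem.List.pyGet?_eq_some_getElem p (by omega) (by exact_mod_cast hjn)]
      simpa [hvj] using hm

theorem pvFoldl_push {α : Type} (c : Int → Bool) (mk : Int → α) :
    ∀ (L : List Int) (st : List α),
    L.foldl (fun st i => if c i then mk i :: st else st) st
      = ((L.filter c).map mk).reverse ++ st := by
  intro L
  induction L with
  | nil => simp
  | cons i L ih =>
    intro st
    by_cases h : c i = true
    · simp [h, ih, List.filter_cons]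
    · simp [h, ih, List.filter_cons]

theorem pvPush_eq (n level : Int) (perm : List Int) (used : List Bool)
    (rest : List (Int × List Int × List Bool)) :
    pvPush n level perm used rest
      = (((PySem.List.pyRange 1 (n + 1) 1).filter
            (fun i => decide (PySem.List.pyGet? used i = some false) && pvAdjA i level perm)).map
          (fun i => (level + 1, perm ++ [i], used.set i.toNat true))).reverse ++ rest := by
  unfold pvPush
  rw [show (fun (st : List (Int × List Int × List Bool)) (i : Int) =>
      if PySem.List.pyGet? used i = some false then
        if pvAdjA i level perm then (level + 1, perm ++ [i], used.set i.toNat true) :: st else st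
      else st)
    = (fun st i => if decide (PySem.List.pyGet? used i = some false) && pvAdjA i level perm
        then (level + 1, perm ++ [i], used.set i.toNat true) :: st else st) from ?_]
  · exact pvFoldl_push _ _ _ rest
  · funext st i
    by_cases h1 : PySem.List.pyGet? used i = some false
    · by_cases h2 : pvAdjA i level perm = true <;> simp [h1, h2]
    · simp [h1]

theorem pvFoldl_append (c : Int → Bool) (g : Int → List (List Int)) :
    ∀ (L : List Int) (a : List (List Int)),
    L.foldl (fun acc i => if c i then acc ++ g i else acc) a
      = a ++ ((L.filter c).map g).flatten := by
  intro L
  induction L with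
  | nil => simp
  | cons i L ih =>
    intro a
    by_cases h : c i = true
    · simp [h, ih, List.filter_cons]
    · simp [h, ih, List.filter_cons]

theorem pvRunA_seg (n : Int) (mk : Int → Int × List Int × List Bool)
    (g : Int → List (List Int)) :
    ∀ (is : List Int) (rest : List (Int × List Int × List Bool)) (res : List (List Int)),
    (∀ i ∈ is, ∀ rest' res', pvRunA n (mk i :: rest') res' = pvRunA n rest' (res' ++ g i)) →
    pvRunA n (is.map mk ++ rest) res = pvRunA n rest (res ++ (is.map g).flatten) := by
  intro is
  induction is with
  | nil => simp
  | cons i is ih =>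
    intro rest res h
    simp only [List.map_cons, List.cons_append, List.flatten_cons]
    rw [h i (by simp), ih rest (res ++ g i) (fun j hj => h j (by simp [hj]))]
    simp [List.append_assoc]

-- main correspondence: one stack entry of A produces exactly B's backtracking output
theorem pvMain (n : Int) (hn : 0 ≤ n) :
    ∀ (k : Nat) (l : Int) (p : List Int) (u : List Bool) (s : PySem.Set Int)
      (rest : List (Int × List Int × List Bool)) (res : List (List Int)),
    l + (k : Int) = n →
    ((u.length : Int) = n + 1) →
    (∀ i : Int, 1 ≤ i → i ≤ n →
      (PySem.Set.contains s i = true ↔ PySem.List.pyGet? u i = some true)) →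
    ((p.length : Int) = l) →
    pvRunA n ((l, p, u) :: rest) res = pvRunA n rest (res ++ pvBT n k p s) := by
  intro k
  induction k with
  | zero =>
    intro l p u s rest res hl hu hs hp
    have : l = n := by push_cast at hl; omega
    rw [pvRunA]
    simp [this, pvBT]
  | succ k ih =>
    intro l p u s rest res hl hu hs hp
    have hln : ¬ (l == n) = true := by
      simp only [beq_iff_eq]; push_cast at hl; omega
    rw [pvRunA, if_neg hln, pvPush_eq]
    -- abbreviations
    set R := PySem.List.pyRange 1 (n + 1) 1 with hR
    set cA : Int → Bool :=
      (fun i => decide (PySem.List.pyGet? u i = some false) && pvAdjA i l p) with hcA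
    set cB : Int → Bool := (fun i => !(PySem.Set.contains s i) && pvAdjB i p) with hcB
    set mk : Int → Int × List Int × List Bool :=
      (fun i => (l + 1, p ++ [i], u.set i.toNat true)) with hmk
    set g : Int → List (List Int) :=
      (fun i => pvBT n k (p ++ [i]) (PySem.Set.add s i)) with hg
    -- the two candidate tests agree on 1..n
    have hcond : ∀ i ∈ R, cA i = cB i := by
      intro i hiR
      obtain ⟨hi1, hi2⟩ := PySem.List.mem_pyRange_one.mp hiR
      have hilt : i < (u.length : Int) := by omega
      have hget : PySem.List.pyGet? u i = some u[i.toNat] :=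
        PySem.List.pyGet?_eq_some_getElem u (by omega) hilt
      have hadj : pvAdjA i l p = pvAdjB i p := by rw [← hp]; exact pvAdj_eq i p
      have hmem := hs i hi1 (by omega)
      rw [hcA, hcB]
      simp only [hget] at hmem ⊢
      cases hub : u[i.toNat] with
      | true =>
        have hin : i ∈ s := (PySem.Set.contains_iff s i).mp (hmem.mpr (by rw [hub]))
        simp [hget, hin, hub]
      | false =>
        have hnin : i ∉ s := fun hm => by
          have := hmem.mp ((PySem.Set.contains_iff s i).mpr hm)
          rw [hub] at this; simp at this
        simp [hget, hnin, hub, hadj]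
    -- children of A satisfy the single-entry correspondence by the induction hypothesis
    have hchild : ∀ i ∈ (R.filter cA).reverse, ∀ rest' res',
        pvRunA n (mk i :: rest') res' = pvRunA n rest' (res' ++ g i) := by
      intro i hi rest' res'
      rw [List.mem_reverse, List.mem_filter] at hi
      obtain ⟨hiR, hci⟩ := hi
      obtain ⟨hi1, hi2⟩ := PySem.List.mem_pyRange_one.mp hiR
      rw [hcA] at hci
      have hfalse : PySem.List.pyGet? u i = some false := by
        have h' := (Bool.and_eq_true _ _).mp hci
        exact of_decide_eq_true h'.1
      -- invariants for the child state
      apply ih (l + 1) (p ++ [i]) (u.set i.toNat true) (PySem.Set.add s i) rest' res'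
      · push_cast at hl ⊢; omega
      · simp [hu]
      · intro j hj1 hj2
        have hjlt : j < (u.length : Int) := by omega
        have hjget : PySem.List.pyGet? u j = some u[j.toNat] :=
          PySem.List.pyGet?_eq_some_getElem u (by omega) hjlt
        have hjget' : PySem.List.pyGet? (u.set i.toNat true) j
            = some ((u.set i.toNat true)[j.toNat]'(by simp; omega)) :=
          PySem.List.pyGet?_eq_some_getElem (u.set i.toNat true) (by omega) (by simp; omega)
        have hcontains : PySem.Set.contains (PySem.Set.add s i) j = true ↔ (j ∈ s ∨ j = i) := by
          rw [PySem.Set.contains_iff, PySem.Set.mem_add]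
        by_cases hji : j = i
        · subst hji
          rw [hjget']
          have : (u.set j.toNat true)[j.toNat]'(by simp; omega) = true := by
            rw [List.getElem_set_self]
          simp [hcontains, this]
        · have hjine : j.toNat ≠ i.toNat := by omega
          rw [hjget']
          have : (u.set i.toNat true)[j.toNat]'(by simp; omega) = u[j.toNat]'(by omega) := by
            rw [List.getElem_set_ne (by omega)]
          rw [this]
          rw [hcontains]
          have := hs j hj1 hj2
          rw [hjget] at this
          constructor
          · rintro (hjs | hji'); · exact this.mp ((PySem.Set.contains_iff s j).mpr hjs)
            · exact absurd hji' hji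
          · intro h; left; exact (PySem.Set.contains_iff s j).mp (this.mpr h)
      · simp; push_cast at hp ⊢; omega
    -- A's pushed segment is the reversed filtered children
    rw [show ((R.filter cA).map mk).reverse = (R.filter cA).reverse.map mk from
      List.map_reverse.symm]
    rw [pvRunA_seg n mk g (R.filter cA).reverse rest res hchild]
    -- B's foldl over the descending range produces the same flattened outputs
    have hB : pvBT n (k + 1) p s = (((R.filter cA).reverse).map g).flatten := by
      rw [pvBT]
      rw [pvFoldl_append cB g (PySem.List.pyRange n 0 (-1)) []]
      rw [show PySem.List.pyRange n 0 (-1) = R.reverse from by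
        rw [PySem.List.pyRange_neg_one_eq_reverse, hR]; norm_num]
      rw [List.filter_reverse, List.filter_congr hcond]
      simp
    rw [hB]

theorem pvRunA_nil (n : Int) (res : List (List Int)) : pvRunA n [] res = res := by
  rw [pvRunA]

-- ===== VERDICT (by name: the statement is the Claim_ definition above) =====
theorem generate_permutations_iterativ_spec : Claim_equal_generate_permutations_iterativ := by
  unfold Claim_equal_generate_permutations_iterativ
  intro n _
  unfold Spec_generate_permutations_iterativ generate_permutations_iterativ
    generate_permutations_iterativ_alt
  by_cases hn : n < 0
  · rw [if_pos hn]
    rw [pvRunA]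
    have h0 : ¬ ((0 : Int) == n) = true := by simp; omega
    rw [if_neg h0]
    unfold pvPush
    rw [PySem.List.pyRange_one_eq_nil (by omega)]
    simp [pvRunA_nil]
  · rw [if_neg hn]
    push_neg at hn
    rw [pvMain n hn n.toNat 0 [] (List.replicate (n + 1).toNat false) PySem.Set.empty [] []
      (by omega)
      (by simp; omega)
      (by
        intro i hi1 hi2
        constructor
        · intro h; exact absurd h (by simp [PySem.Set.contains, PySem.Set.empty])
        · intro h
          have hget : PySem.List.pyGet? (List.replicate (n + 1).toNat false) i
              = some false := by
            rw [PySem.List.pyGet?_of_nonneg _ (by omega)]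
            simp [List.getElem?_replicate]
            omega
          rw [hget] at h; simp at h)
      (by simp)]
    rw [pvRunA_nil]
    simp
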